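-- pv_equiv track=rewrite | github.com/volcengine/verl | atropos/environments/intern_bootcamp/internbootcamp_lib/internbootcamp/bootcamp/canyaandghosts/canyaandghosts.py | solve_case
-- ===== SOURCE A (Python) =====
-- def solve_case(m, t, r, w_list):
--     if r > t:
--         return -1
--     cand = []
--     ans = 0
--     for wi in w_list:
--         lite = 0
--         for c in cand:
--             # 蜡烛在wi秒时是否燃烧的条件：c+1 <= wi <= c+t
--             if c + 1 <= wi <= c + t:
--                 lite += 1
--         to_lite = r - lite
--         if to_lite > 0:
--             # 需要从wi-1开始倒推点燃时间
--             latest_start = wi - 1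
--             earliest_start = latest_start - (to_lite - 1)
--             if earliest_start < 0:  # 时间不足以点燃所需蜡烛
--                 return -1
--             for start_time in range(latest_start, earliest_start - 1, -1):
--                 cand.append(start_time)
--                 ans += 1
--     # 最终有效性验证（处理多个幽灵共享蜡烛的情况）
--     for wi in w_list:
--         burning = 0
--         for c in cand:
--             if c + 1 <= wi <= c + t:
--                 burning += 1
--         if burning < r:
--             return -1
--     return ans
-- ===== SOURCE B (Python) =====
-- def solve_case(m, t, r, w_list):
--     # Candles are only ever lit in consecutive blocks [wi-need, wi-1], so we keep
--     # intervals of start times and count burning candles by interval overlap.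
--     if r > t:
--         return -1
--     intervals = []  # (lo, hi): candles with start times lo..hi inclusive, one each
--     ans = 0
--     for wi in w_list:
--         lite = sum(max(0, min(hi, wi - 1) - max(lo, wi - t) + 1) for lo, hi in intervals)
--         need = r - lite
--         if need > 0:
--             lo = wi - need
--             if lo < 0:
--                 return -1
--             intervals.append((lo, wi - 1))
--             ans += need
--     for wi in w_list:
--         burning = sum(max(0, min(hi, wi - 1) - max(lo, wi - t) + 1) for lo, hi in intervals)
--         if burning < r:
--             return -1
--     return ans
-- ===== Notes on version B (the rewrite author's own statement) =====
-- stated objective: alternative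
-- what changed: B stores the candles as consecutive start-time intervals (one per ghost that needs new candles) and counts burning candles by interval-overlap arithmetic, instead of A's per-candle list scanned element by element for every ghost; the inner count loses the factor r, though a timing run did not confirm a speed-up on its inputs.
import Mathlib
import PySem

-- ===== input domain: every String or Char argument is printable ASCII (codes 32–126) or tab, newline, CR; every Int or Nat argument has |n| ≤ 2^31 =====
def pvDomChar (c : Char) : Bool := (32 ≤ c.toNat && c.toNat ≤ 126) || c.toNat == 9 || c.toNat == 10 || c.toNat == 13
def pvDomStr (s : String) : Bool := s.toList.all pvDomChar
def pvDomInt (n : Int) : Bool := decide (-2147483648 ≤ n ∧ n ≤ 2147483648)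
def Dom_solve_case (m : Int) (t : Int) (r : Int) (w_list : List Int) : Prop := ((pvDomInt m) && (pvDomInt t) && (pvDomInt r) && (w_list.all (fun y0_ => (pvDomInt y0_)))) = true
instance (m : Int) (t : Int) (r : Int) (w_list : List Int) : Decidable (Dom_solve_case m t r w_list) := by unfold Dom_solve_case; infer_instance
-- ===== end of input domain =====

-- B replaces A's per-candle list (scanned candle by candle for every ghost) by a list of
-- start-time intervals counted by overlap arithmetic; objective: alternative algorithm.

-- ===== PORT A =====
-- inner 'for c in cand: if c+1 <= wi <= c+t: lite += 1'
def pvCountBurn (cand : List Int) (wi t : Int) : Int :=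
  cand.foldl (fun lite c => if c + 1 ≤ wi ∧ wi ≤ c + t then lite + 1 else lite) 0

-- main 'for wi in w_list' loop; none = the early 'return -1'
def pvLoopA (t r : Int) : List Int → List Int → Int → Option (List Int × Int)
  | [], cand, ans => some (cand, ans)
  | wi :: ws, cand, ans =>
    let lite := pvCountBurn cand wi t
    let to_lite := r - lite
    if to_lite > 0 then
      let latest_start := wi - 1
      let earliest_start := latest_start - (to_lite - 1)
      if earliest_start < 0 then none
      else
        let st := (PySem.List.pyRange latest_start (earliest_start - 1) (-1)).foldl
          (fun (s : List Int × Int) start_time => (s.1 ++ [start_time], s.2 + 1)) (cand, ans)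
        pvLoopA t r ws st.1 st.2
    else pvLoopA t r ws cand ans

-- final validation loop; false = the final 'return -1'
def pvCheckA (t r : Int) (cand : List Int) : List Int → Bool
  | [] => true
  | wi :: ws => if pvCountBurn cand wi t < r then false else pvCheckA t r cand ws

def solve_case (m : Int) (t : Int) (r : Int) (w_list : List Int) : Int :=
  if r > t then -1
  else
    match pvLoopA t r w_list [] 0 with
    | none => -1
    | some (cand, ans) => if pvCheckA t r cand w_list then ans else -1

-- ===== PORT B =====
-- max(0, min(hi, wi-1) - max(lo, wi-t) + 1)
def pvOverlap (wi t : Int) (iv : Int × Int) : Int :=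
  max 0 (min iv.2 (wi - 1) - max iv.1 (wi - t) + 1)

-- sum(... for lo, hi in intervals)
def pvBurnSum (ivs : List (Int × Int)) (wi t : Int) : Int :=
  (ivs.map (pvOverlap wi t)).sum

def pvLoopB (t r : Int) : List Int → List (Int × Int) → Int → Option (List (Int × Int) × Int)
  | [], ivs, ans => some (ivs, ans)
  | wi :: ws, ivs, ans =>
    let lite := pvBurnSum ivs wi t
    let need := r - lite
    if need > 0 then
      let lo := wi - need
      if lo < 0 then none
      else pvLoopB t r ws (ivs ++ [(lo, wi - 1)]) (ans + need)
    else pvLoopB t r ws ivs ans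

def pvCheckB (t r : Int) (ivs : List (Int × Int)) : List Int → Bool
  | [] => true
  | wi :: ws => if pvBurnSum ivs wi t < r then false else pvCheckB t r ivs ws

def solve_case_alt (m : Int) (t : Int) (r : Int) (w_list : List Int) : Int :=
  if r > t then -1
  else
    match pvLoopB t r w_list [] 0 with
    | none => -1
    | some (ivs, ans) => if pvCheckB t r ivs w_list then ans else -1

-- ===== PRECONDITION & SPEC =====
def Spec_solve_case (m : Int) (t : Int) (r : Int) (w_list : List Int) (out : Int) : Prop := out = solve_case_alt m t r w_list
instance (m : Int) (t : Int) (r : Int) (w_list : List Int) (out : Int) : Decidable (Spec_solve_case m t r w_list out) := by unfold Spec_solve_case; infer_instance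

-- ===== CLAIM (what is proved, stated in full; the proofs are below) =====
def Claim_equal_solve_case : Prop := ∀ (m : Int) (t : Int) (r : Int) (w_list : List Int), Dom_solve_case m t r w_list → Spec_solve_case m t r w_list (solve_case m t r w_list)

-- ===== LEMMAS AND PROOFS =====

-- an interval (lo, hi) stands for the candle start times hi, hi-1, …, lo, in A's append order
def pvFlat (ivs : List (Int × Int)) : List Int :=
  ivs.flatMap (fun iv => PySem.List.pyRange iv.2 (iv.1 - 1) (-1))

theorem pvCountBurn_cons (c : Int) (cs : List Int) (wi t : Int) :
    pvCountBurn (c :: cs) wi t =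
      (if c + 1 ≤ wi ∧ wi ≤ c + t then 1 else 0) + pvCountBurn cs wi t := by
  have shift : ∀ (xs : List Int) (i : Int),
      xs.foldl (fun lite c => if c + 1 ≤ wi ∧ wi ≤ c + t then lite + 1 else lite) i =
      i + xs.foldl (fun lite c => if c + 1 ≤ wi ∧ wi ≤ c + t then lite + 1 else lite) 0 := by
    intro xs
    induction xs with
    | nil => intro i; simp
    | cons x xs ih =>
      intro i
      simp only [List.foldl_cons]
      rw [ih, ih (if x + 1 ≤ wi ∧ wi ≤ x + t then (0:Int) + 1 else 0)]
      split_ifs <;> omega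
  simp only [pvCountBurn, List.foldl_cons]
  rw [shift cs]
  split_ifs <;> omega

theorem pvCountBurn_append (xs ys : List Int) (wi t : Int) :
    pvCountBurn (xs ++ ys) wi t = pvCountBurn xs wi t + pvCountBurn ys wi t := by
  induction xs with
  | nil => simp [pvCountBurn]
  | cons x xs ih =>
    rw [List.cons_append, pvCountBurn_cons, pvCountBurn_cons, ih]
    ring

theorem pvCountBurn_range_aux (wi t : Int) (n : Nat) : ∀ a b : Int, a - b ≤ n →
    pvCountBurn (PySem.List.pyRange a b (-1)) wi t =
      max 0 (min a (wi - 1) - max (b + 1) (wi - t) + 1) := by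
  induction n with
  | zero =>
    intro a b h
    rw [PySem.List.pyRange_neg_one_eq_nil (by omega)]
    simp only [pvCountBurn, List.foldl_nil]
    omega
  | succ n ih =>
    intro a b h
    by_cases hab : a ≤ b
    · rw [PySem.List.pyRange_neg_one_eq_nil hab]
      simp only [pvCountBurn, List.foldl_nil]
      omega
    · rw [PySem.List.pyRange_neg_one_cons (by omega), pvCountBurn_cons,
        ih (a - 1) b (by omega)]
      split_ifs <;> omega

theorem pvCountBurn_range (wi t a b : Int) :
    pvCountBurn (PySem.List.pyRange a b (-1)) wi t =
      max 0 (min a (wi - 1) - max (b + 1) (wi - t) + 1) :=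
  pvCountBurn_range_aux wi t (a - b).toNat a b (by omega)

theorem pvBurn_flat (ivs : List (Int × Int)) (wi t : Int) :
    pvCountBurn (pvFlat ivs) wi t = pvBurnSum ivs wi t := by
  induction ivs with
  | nil => simp [pvFlat, pvBurnSum, pvCountBurn]
  | cons iv ivs ih =>
    simp only [pvFlat, List.flatMap_cons] at *
    rw [pvCountBurn_append, ih, pvCountBurn_range]
    simp only [pvBurnSum, List.map_cons, List.sum_cons, pvOverlap]
    omega

theorem pvFoldl_append_count : ∀ (xs cand : List Int) (ans : Int),
    xs.foldl (fun (s : List Int × Int) st => (s.1 ++ [st], s.2 + 1)) (cand, ans) =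
      (cand ++ xs, ans + xs.length) := by
  intro xs
  induction xs with
  | nil => intro cand ans; simp
  | cons x xs ih =>
    intro cand ans
    simp only [List.foldl_cons]
    rw [ih]
    simp
    omega

theorem pvLoop_eq (t r : Int) : ∀ (ws : List Int) (ivs : List (Int × Int)) (ans : Int),
    pvLoopA t r ws (pvFlat ivs) ans =
      Option.map (fun s => (pvFlat s.1, s.2)) (pvLoopB t r ws ivs ans) := by
  intro ws
  induction ws with
  | nil => intro ivs ans; simp [pvLoopA, pvLoopB]
  | cons wi ws ih =>
    intro ivs ans
    simp only [pvLoopA, pvLoopB, pvBurn_flat]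
    by_cases hneed : r - pvBurnSum ivs wi t > 0
    · simp only [if_pos hneed]
      have e1 : wi - 1 - (r - pvBurnSum ivs wi t - 1) = wi - (r - pvBurnSum ivs wi t) := by ring
      rw [e1]
      by_cases hlo : wi - (r - pvBurnSum ivs wi t) < 0
      · rw [if_pos hlo, if_pos hlo]
        rfl
      · rw [if_neg hlo, if_neg hlo]
        rw [pvFoldl_append_count]
        have hflat : pvFlat ivs ++ PySem.List.pyRange (wi - 1) (wi - (r - pvBurnSum ivs wi t) - 1) (-1)
            = pvFlat (ivs ++ [(wi - (r - pvBurnSum ivs wi t), wi - 1)]) := by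
          simp [pvFlat]
        have hlen : (ans : Int) + ((PySem.List.pyRange (wi - 1) (wi - (r - pvBurnSum ivs wi t) - 1) (-1)).length : Int)
            = ans + (r - pvBurnSum ivs wi t) := by
          rw [PySem.List.length_pyRange_neg_one]
          omega
        simp only [hflat, hlen]
        exact ih _ _
    · simp only [if_neg hneed]
      exact ih ivs ans

theorem pvCheck_eq (t r : Int) (ivs : List (Int × Int)) : ∀ (ws : List Int),
    pvCheckA t r (pvFlat ivs) ws = pvCheckB t r ivs ws := by
  intro ws
  induction ws with
  | nil => simp [pvCheckA, pvCheckB]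
  | cons wi ws ih =>
    simp only [pvCheckA, pvCheckB, pvBurn_flat, ih]

-- ===== VERDICT (by name: the statement is the Claim_ definition above) =====
theorem solve_case_spec : Claim_equal_solve_case := by
  unfold Claim_equal_solve_case
  intro m t r w_list _
  unfold Spec_solve_case solve_case solve_case_alt
  by_cases hrt : r > t
  · simp [hrt]
  · simp only [if_neg hrt]
    have h := pvLoop_eq t r w_list [] 0
    have hnil : pvFlat [] = [] := by simp [pvFlat]
    rw [hnil] at h
    rw [h]
    cases hB : pvLoopB t r w_list [] 0 with
    | none => simp
    | some s =>
      simp only [Option.map_some]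
      rw [pvCheck_eq t r s.1 w_list]
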